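-- pv_equiv track=rewrite | github.com/zwdnet/MyQuant | 44/01/ycac.py | minCommand
-- ===== SOURCE A (Python) =====
-- def minCommand(cap):
--     n = len(cap)
--     # 先把"F"变成"B"
--     minTimesB = 0
--     bF = False
--     for i in range(n):
--         if cap[i] == "F":
--             bF = True
--             if i == n-1:
--                 minTimesB += 1
--             continue
--         if bF == True:
--             minTimesB += 1
--         bF = False
--     # 再把"B"变成"F"
--     minTimesF = 0
--     bB = False
--     for i in range(n):
--         if cap[i] == "B":
--             bB = True
--             if i == n-1:
--                 minTimesF += 1
--             continue
--         if bB == True: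
--             minTimesF += 1
--         bB = False
--     return min(minTimesB, minTimesF)
-- ===== SOURCE B (Python) =====
-- def minCommand(cap):
--     # run starts: chars that differ from their predecessor (first char always starts a run)
--     runs = [c for c, p in zip(cap, [None] + list(cap)) if c != p]
--     return min(runs.count('F'), runs.count('B'))
-- ===== Notes on version B (the rewrite author's own statement) =====
-- stated objective: simpler
-- what changed: Replaces the two manual boundary-tracking scans with flags and last-index special cases by a zip-with-shifted-self comprehension collapsing the string into run-start keys, then min of two counts.
import Mathlib
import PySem

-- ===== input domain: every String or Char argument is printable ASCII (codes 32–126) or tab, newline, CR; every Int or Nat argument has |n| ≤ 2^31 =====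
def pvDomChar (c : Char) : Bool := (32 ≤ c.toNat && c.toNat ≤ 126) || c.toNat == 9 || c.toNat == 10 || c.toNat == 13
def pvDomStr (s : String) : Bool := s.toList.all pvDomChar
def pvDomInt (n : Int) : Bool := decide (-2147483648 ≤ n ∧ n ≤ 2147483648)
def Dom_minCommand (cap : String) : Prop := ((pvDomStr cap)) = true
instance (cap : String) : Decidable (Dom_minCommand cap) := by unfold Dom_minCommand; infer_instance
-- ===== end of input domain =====

-- B replaces A's two flag-carrying scans (with last-index special cases) by collapsing the
-- string into run-start keys via a zip with its shifted self, then taking min of two counts.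

-- ===== PORT A =====
-- A's two loops are identical up to the target letter; ported as one helper over the char
-- list (rest = [] plays the role of i == n-1), with the same state (acc, flag) and branches.
def pvLoopA (ch : Char) : List Char → Int → Bool → Int
  | [], acc, _ => acc
  | c :: rest, acc, flag =>
    if c = ch then
      pvLoopA ch rest (if rest = [] then acc + 1 else acc) true
    else
      pvLoopA ch rest (if flag then acc + 1 else acc) false

def minCommand (cap : String) : Int :=
  min (pvLoopA 'F' cap.toList 0 false) (pvLoopA 'B' cap.toList 0 false)

-- ===== PORT B =====
-- runs = [c for c, p in zip(cap, [None] + list(cap)) if c != p]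
def pvRunKeys (cs : List Char) : List Char :=
  ((cs.zip ((none : Option Char) :: cs.map some)).filter
    (fun x => decide (some x.1 ≠ x.2))).map Prod.fst

def minCommand_alt (cap : String) : Int :=
  min ((pvRunKeys cap.toList).count 'F' : Int) ((pvRunKeys cap.toList).count 'B' : Int)

-- ===== PRECONDITION & SPEC =====
def Spec_minCommand (cap : String) (out : Int) : Prop := out = minCommand_alt cap
instance (cap : String) (out : Int) : Decidable (Spec_minCommand cap out) := by unfold Spec_minCommand; infer_instance

-- ===== CLAIM (what is proved, stated in full; the proofs are below) =====
def Claim_equal_minCommand : Prop := ∀ (cap : String), Dom_minCommand cap → Spec_minCommand cap (minCommand cap)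

-- ===== LEMMAS AND PROOFS =====

-- number of runs of ch in cs, given the previous character (none at the start)
def pvRunsCnt (ch : Char) : Option Char → List Char → Nat
  | _, [] => 0
  | p, c :: rest => (if c = ch ∧ p ≠ some ch then 1 else 0) + pvRunsCnt ch (some c) rest

theorem pvRunsCnt_congr (ch : Char) (p q : Option Char) (h : p = some ch ↔ q = some ch) :
    ∀ cs, pvRunsCnt ch p cs = pvRunsCnt ch q cs
  | [] => rfl
  | c :: rest => by
    unfold pvRunsCnt
    congr 1
    by_cases hq : q = some ch
    · simp [hq, h.mpr hq]
    · simp [hq, h]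

theorem pvLoopA_eq (ch : Char) : ∀ (cs : List Char) (acc : Int) (b : Bool),
    pvLoopA ch cs acc b =
      acc + (pvRunsCnt ch (if b then some ch else none) cs : Int)
          + (if b = true ∧ cs ≠ [] then 1 else 0) := by
  intro cs
  induction cs with
  | nil => intro acc b; simp [pvLoopA, pvRunsCnt]
  | cons c rest ih =>
    intro acc b
    by_cases hc : c = ch
    · subst hc
      simp only [pvLoopA, if_pos rfl, ih, pvRunsCnt]
      by_cases hr : rest = [] <;> cases b <;> simp [hr, pvRunsCnt] <;> push_cast <;> ring
    · have hcg : pvRunsCnt ch (some c) rest = pvRunsCnt ch (none : Option Char) rest :=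
        pvRunsCnt_congr ch _ _ (by simp [hc]) rest
      simp only [pvLoopA, if_neg hc, ih, pvRunsCnt, hcg]
      cases b <;> simp [hc] <;> push_cast <;> ring

theorem pvRunKeys_count (ch : Char) : ∀ (cs : List Char) (p : Option Char),
    (((cs.zip (p :: cs.map some)).filter
        (fun x => decide (some x.1 ≠ x.2))).map Prod.fst).count ch
      = pvRunsCnt ch p cs := by
  intro cs
  induction cs with
  | nil => intro p; simp [pvRunsCnt]
  | cons c rest ih =>
    intro p
    simp only [List.map_cons, List.zip_cons_cons, List.filter_cons, pvRunsCnt]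
    by_cases hp : some c = p
    · have h0 : ¬ (c = ch ∧ p ≠ some ch) := by
        rintro ⟨rfl, hne⟩; exact hne hp.symm
      rw [if_neg (by simp [hp]), hp, ih p]
      simp [h0]
    · rw [if_pos (by simp [hp])]
      simp only [List.map_cons, List.count_cons, ih (some c)]
      by_cases hc : c = ch
      · subst hc
        have h1 : c = c ∧ p ≠ some c := ⟨rfl, fun h => hp h.symm⟩
        simp [h1]
        omega
      · simp [hc]

-- ===== VERDICT (by name: the statement is the Claim_ definition above) =====
theorem minCommand_spec : Claim_equal_minCommand := by
  intro cap _
  unfold Spec_minCommand minCommand minCommand_alt pvRunKeys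
  rw [pvRunKeys_count 'F' cap.toList none, pvRunKeys_count 'B' cap.toList none,
    pvLoopA_eq, pvLoopA_eq]
  simp
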